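-- pv_equiv track=rewrite | github.com/123jimin/ckp | ckp/number_theory/misc.py | iterate_idiv
-- ===== SOURCE A (Python) =====
-- def iterate_idiv(x: int):
--     """
--         Yields tuples of ([x/i], i_begin, i_end), in a decreasing order for [x/i].
--
--         In other words, values `(q, a, b)` represent that `x//i == q` holds for all `i` precisely in `range(a, b)`.
--
--         Note that using this function is about 25% slower than using `q = x//a; b = x//q+1; a = b`.
--
--         Time complexity: O(sqrt(x))
--     """
--     yield(x, 1, 2)
--
--     if x <= 3:
--         if x == 2: yield (1, 2, 3)
--         elif x == 3: yield (1, 2, 4)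
--         return
--
--     prev_q = x//2
--
--     for i in range(3, x+1):
--         if (q := x//i) == prev_q: break
--         yield (prev_q, i-1, i)
--         prev_q = q
--
--     i -= 1
--
--     for q in range(prev_q, 1, -1):
--         next_i = x//q + 1
--         yield (q, i, next_i)
--         i = next_i
--
--     yield(1, i, x+1)
-- ===== SOURCE B (Python) =====
-- def iterate_idiv(x: int):
--     """Same blocks as A, produced by one block-jumping loop."""
--     if x <= 0:
--         yield (x, 1, 2)
--         return
--     a = 1
--     while a <= x:
--         q = x // a
--         b = x // q + 1
--         yield (q, a, b)
--         a = b
-- ===== Notes on version B (the rewrite author's own statement) =====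
-- stated objective: simpler
-- what changed: Replaces A's two-phase structure (an ascending one-step loop that breaks when quotients repeat, then a descending loop over quotient values, plus x==2/x==3 special cases) with one block-jumping while loop: q = x//a, b = x//q+1, yield (q,a,b), a = b.
import Mathlib
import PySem

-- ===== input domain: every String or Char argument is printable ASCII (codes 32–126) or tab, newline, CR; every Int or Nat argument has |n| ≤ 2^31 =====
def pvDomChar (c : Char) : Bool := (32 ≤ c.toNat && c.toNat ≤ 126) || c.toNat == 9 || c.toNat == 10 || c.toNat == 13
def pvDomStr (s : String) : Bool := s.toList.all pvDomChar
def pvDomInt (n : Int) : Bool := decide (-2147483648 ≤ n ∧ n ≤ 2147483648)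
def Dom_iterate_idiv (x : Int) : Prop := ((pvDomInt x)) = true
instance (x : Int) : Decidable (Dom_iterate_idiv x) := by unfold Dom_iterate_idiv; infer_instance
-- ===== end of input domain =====

-- B replaces A's two-phase loops and x==2/x==3 special cases with one block-jumping loop (objective: simpler).

-- bounds of floor division, used by proofs and by B's termination argument
theorem pv_fdiv_bounds (x a : Int) (ha : 0 < a) :
    PySem.Int.floordiv x a * a ≤ x ∧ x < (PySem.Int.floordiv x a + 1) * a :=
  (PySem.Int.floordiv_eq_iff_of_pos ha).1 rfl

-- termination measures, named so the definition bodies stay small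
theorem pv_measure_up (x i : Int) (h : i ≤ x) : (x + 1 - (i + 1)).toNat < (x + 1 - i).toNat := by
  omega

theorem pv_measure_down (q : Int) (h : 2 ≤ q) : (q - 1).toNat < q.toNat := by
  omega

-- ===== PORT A =====
-- A's ascending 'for i in range(3, x+1)' with its break (walrus q := x//i); returns
-- (yielded tuples, Python's i after the loop, prev_q). Only called with 4 ≤ x, so the
-- range is nonempty; if the loop exhausts, Python's i is the last range value x.
def iterate_idiv_asc (x i prev_q : Int) : (List (Int × Int × Int)) × Int × Int :=
  if h : i ≤ x then
    let q := PySem.Int.floordiv x i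
    if q = prev_q then ([], i, prev_q)
    else
      let r := iterate_idiv_asc x (i + 1) q
      ((prev_q, i - 1, i) :: r.1, r.2)
  else ([], x, prev_q)
termination_by (x + 1 - i).toNat
decreasing_by exact pv_measure_up x i h

-- A's descending 'for q in range(prev_q, 1, -1)'; returns (yielded tuples, final i)
def iterate_idiv_desc (x q i : Int) : (List (Int × Int × Int)) × Int :=
  if h : 2 ≤ q then
    let next_i := PySem.Int.floordiv x q + 1
    let r := iterate_idiv_desc x (q - 1) next_i
    ((q, i, next_i) :: r.1, r.2)
  else ([], i)
termination_by q.toNat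
decreasing_by exact pv_measure_down q h

def iterate_idiv (x : Int) : List (Int × Int × Int) :=
  (x, 1, 2) ::
    (if x ≤ 3 then
      (if x = 2 then [(1, 2, 3)] else if x = 3 then [(1, 2, 4)] else [])
    else
      let r := iterate_idiv_asc x 3 (PySem.Int.floordiv x 2)
      let r2 := iterate_idiv_desc x r.2.2 (r.2.1 - 1)
      r.1 ++ r2.1 ++ [(1, r2.2, x + 1)])

-- ===== PORT B =====
-- termination fact for B's while loop: the next block start is strictly larger
theorem pv_alt_step (x a : Int) (h1 : 1 ≤ a) (h2 : a ≤ x) :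
    a < PySem.Int.floordiv x (PySem.Int.floordiv x a) + 1 := by
  have hq : 1 ≤ PySem.Int.floordiv x a :=
    (PySem.Int.le_floordiv_iff_mul_le (by omega)).2 (by omega)
  have h3 : a ≤ PySem.Int.floordiv x (PySem.Int.floordiv x a) := by
    refine (PySem.Int.le_floordiv_iff_mul_le (by omega)).2 ?_
    have hb := (pv_fdiv_bounds x a (by omega)).1
    nlinarith
  omega

theorem pv_alt_measure (x a : Int) (h1 : 1 ≤ a) (h2 : a ≤ x) :
    (x + 1 - (PySem.Int.floordiv x (PySem.Int.floordiv x a) + 1)).toNat < (x + 1 - a).toNat := by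
  have := pv_alt_step x a h1 h2
  omega

-- B's 'while a <= x' loop (a stays ≥ 1 throughout; the conjunct makes the recursion total)
def iterate_idiv_alt_loop (x a : Int) : List (Int × Int × Int) :=
  if h : 1 ≤ a ∧ a ≤ x then
    let q := PySem.Int.floordiv x a
    let b := PySem.Int.floordiv x q + 1
    (q, a, b) :: iterate_idiv_alt_loop x b
  else []
termination_by (x + 1 - a).toNat
decreasing_by exact pv_alt_measure x a h.1 h.2

def iterate_idiv_alt (x : Int) : List (Int × Int × Int) :=
  if x ≤ 0 then [(x, 1, 2)] else iterate_idiv_alt_loop x 1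

-- ===== PRECONDITION & SPEC =====
def Spec_iterate_idiv (x : Int) (out : List (Int × Int × Int)) : Prop := out = iterate_idiv_alt x
instance (x : Int) (out : List (Int × Int × Int)) : Decidable (Spec_iterate_idiv x out) := by unfold Spec_iterate_idiv; infer_instance

-- ===== CLAIM (what is proved, stated in full; the proofs are below) =====
def Claim_equal_iterate_idiv : Prop := ∀ (x : Int), Dom_iterate_idiv x → Spec_iterate_idiv x (iterate_idiv x)

-- ===== LEMMAS AND PROOFS =====

-- one-step unfolding lemmas for the three loops
theorem asc_break (x i pq : Int) (h : i ≤ x) (he : PySem.Int.floordiv x i = pq) :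
    iterate_idiv_asc x i pq = ([], i, pq) := by
  rw [iterate_idiv_asc]; simp [h, he]

theorem asc_step (x i pq : Int) (h : i ≤ x) (hne : PySem.Int.floordiv x i ≠ pq) :
    iterate_idiv_asc x i pq =
      ((pq, i - 1, i) :: (iterate_idiv_asc x (i + 1) (PySem.Int.floordiv x i)).1,
        (iterate_idiv_asc x (i + 1) (PySem.Int.floordiv x i)).2) := by
  rw [iterate_idiv_asc]; simp [h, hne]

theorem desc_step (x q i : Int) (h : 2 ≤ q) :
    iterate_idiv_desc x q i =
      ((q, i, PySem.Int.floordiv x q + 1) ::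
          (iterate_idiv_desc x (q - 1) (PySem.Int.floordiv x q + 1)).1,
        (iterate_idiv_desc x (q - 1) (PySem.Int.floordiv x q + 1)).2) := by
  rw [iterate_idiv_desc]; simp [h]

theorem desc_nil (x q i : Int) (h : ¬ 2 ≤ q) : iterate_idiv_desc x q i = ([], i) := by
  rw [iterate_idiv_desc]; simp [h]

theorem alt_loop_cons (x a : Int) (h1 : 1 ≤ a) (h2 : a ≤ x) :
    iterate_idiv_alt_loop x a =
      (PySem.Int.floordiv x a, a, PySem.Int.floordiv x (PySem.Int.floordiv x a) + 1) ::
        iterate_idiv_alt_loop x (PySem.Int.floordiv x (PySem.Int.floordiv x a) + 1) := by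
  rw [iterate_idiv_alt_loop]; simp [h1, h2]

theorem alt_loop_nil (x a : Int) (h : ¬ (1 ≤ a ∧ a ≤ x)) : iterate_idiv_alt_loop x a = [] := by
  rw [iterate_idiv_alt_loop]; simp [h]
  try omega

-- elementary floor-division facts
theorem fd_pos (x a : Int) (h1 : 1 ≤ a) (h2 : a ≤ x) : 1 ≤ PySem.Int.floordiv x a :=
  (PySem.Int.le_floordiv_iff_mul_le (by omega)).2 (by omega)

theorem fd_one (x : Int) : PySem.Int.floordiv x 1 = x := by
  rw [PySem.Int.floordiv_eq_iff_of_pos (by omega)]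
  constructor <;> nlinarith

theorem fd_self (x : Int) (h : 1 ≤ x) : PySem.Int.floordiv x x = 1 := by
  rw [PySem.Int.floordiv_eq_iff_of_pos (by omega)]
  constructor <;> nlinarith

theorem fd_pred (x : Int) (h : 3 ≤ x) : PySem.Int.floordiv x (x - 1) = 1 := by
  rw [PySem.Int.floordiv_eq_iff_of_pos (by omega)]
  constructor <;> nlinarith

theorem fd_anti (x a b : Int) (h1 : 1 ≤ a) (hab : a ≤ b) (hbx : b ≤ x) :
    PySem.Int.floordiv x b ≤ PySem.Int.floordiv x a := by
  have hqb : 1 ≤ PySem.Int.floordiv x b := fd_pos x b (by omega) hbx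
  have hb := (pv_fdiv_bounds x b (by omega)).1
  refine (PySem.Int.le_floordiv_iff_mul_le (by omega)).2 ?_
  nlinarith

-- if the quotient strictly drops at a+1, then a's block is exactly [a, a+1), i.e. x // (x // a) = a
theorem fd_inv (x a : Int) (h1 : 1 ≤ a) (h2 : a + 1 ≤ x)
    (h3 : PySem.Int.floordiv x (a + 1) < PySem.Int.floordiv x a) :
    PySem.Int.floordiv x (PySem.Int.floordiv x a) = a := by
  have hq : 1 ≤ PySem.Int.floordiv x a := fd_pos x a h1 (by omega)
  have hb := pv_fdiv_bounds x a (by omega)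
  rw [PySem.Int.floordiv_eq_iff_of_pos (by omega)]
  refine ⟨by nlinarith, ?_⟩
  by_contra hcon
  push Not at hcon
  have : PySem.Int.floordiv x a ≤ PySem.Int.floordiv x (a + 1) :=
    (PySem.Int.le_floordiv_iff_mul_le (by omega)).2 (by nlinarith)
  omega

-- a repeated quotient forces x // a < a (A's break point is past the square root)
theorem fd_break (x a : Int) (h1 : 1 ≤ a) (_hax : a + 1 ≤ x)
    (heq : PySem.Int.floordiv x (a + 1) = PySem.Int.floordiv x a) :
    PySem.Int.floordiv x a < a := by
  have b1 := pv_fdiv_bounds x a (by omega)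
  have b2 := pv_fdiv_bounds x (a + 1) (by omega)
  rw [heq] at b2
  nlinarith [b1.2, b2.1]

-- in the tail region every quotient value occurs: x // (x//(q+1) + 1) = q
theorem fd_next (x q : Int) (h1 : 1 ≤ q) (h2 : q * (q + 1) ≤ x) :
    PySem.Int.floordiv x (PySem.Int.floordiv x (q + 1) + 1) = q := by
  have hd : q ≤ PySem.Int.floordiv x (q + 1) :=
    (PySem.Int.le_floordiv_iff_mul_le (by omega)).2 h2
  have hb := pv_fdiv_bounds x (q + 1) (by omega)
  rw [PySem.Int.floordiv_eq_iff_of_pos (by omega)]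
  exact ⟨by nlinarith [hb.1], by nlinarith [hb.2]⟩

-- what A produces from the ascending loop onward (proof-only bookkeeping)
def A_tail (x i pq : Int) : List (Int × Int × Int) :=
  let r := iterate_idiv_asc x i pq
  let r2 := iterate_idiv_desc x r.2.2 (r.2.1 - 1)
  r.1 ++ (r2.1 ++ [(1, r2.2, x + 1)])

theorem A_tail_break (x i pq : Int) (h : i ≤ x) (he : PySem.Int.floordiv x i = pq) :
    A_tail x i pq =
      (iterate_idiv_desc x pq (i - 1)).1 ++ [(1, (iterate_idiv_desc x pq (i - 1)).2, x + 1)] := by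
  simp [A_tail, asc_break x i pq h he]

theorem A_tail_step (x i pq : Int) (h : i ≤ x) (hne : PySem.Int.floordiv x i ≠ pq) :
    A_tail x i pq = (pq, i - 1, i) :: A_tail x (i + 1) (PySem.Int.floordiv x i) := by
  simp [A_tail, asc_step x i pq h hne]

-- A's descending phase agrees with B's loop
theorem desc_eq (x : Int) (hx : 4 ≤ x) :
    ∀ (n : Nat) (q i : Int), q.toNat ≤ n → 1 ≤ q → q ≤ i → i ≤ x →
      PySem.Int.floordiv x i = q →
      (iterate_idiv_desc x q i).1 ++ [(1, (iterate_idiv_desc x q i).2, x + 1)] =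
        iterate_idiv_alt_loop x i := by
  intro n
  induction n with
  | zero => intro q i hn h1 _ _ _; omega
  | succ n ih =>
    intro q i hn h1 hqi hix hfi
    have hi1 : 1 ≤ i := le_trans h1 hqi
    rw [alt_loop_cons x i hi1 hix, hfi]
    by_cases h2q : 2 ≤ q
    · rw [desc_step x q i h2q]
      simp only [List.cons_append]
      refine congrArg _ ?_
      have hqd : q ≤ PySem.Int.floordiv x q := by
        have := fd_anti x q i h1 hqi hix
        omega
      have hfd2 : PySem.Int.floordiv x q ≤ PySem.Int.floordiv x 2 :=
        fd_anti x 2 q (by omega) h2q (by omega)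
      have hb2 := (pv_fdiv_bounds x 2 (by omega)).1
      have hp2 : 1 ≤ PySem.Int.floordiv x 2 := fd_pos x 2 (by omega) (by omega)
      have hix' : PySem.Int.floordiv x q + 1 ≤ x := by omega
      have hbi := (pv_fdiv_bounds x i (by omega)).1
      rw [hfi] at hbi
      have hmul : (q - 1) * q ≤ x := by nlinarith
      have hnext : PySem.Int.floordiv x (PySem.Int.floordiv x q + 1) = q - 1 := by
        have := fd_next x (q - 1) (by omega) (by simpa using hmul)
        simpa using this
      exact ih (q - 1) (PySem.Int.floordiv x q + 1) (by omega) (by omega) (by omega) hix' hnext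
    · have hq1 : q = 1 := by omega
      subst hq1
      rw [desc_nil x 1 i h2q, fd_one x, alt_loop_nil x (x + 1) (by omega)]
      simp
-- A's ascending phase (from position a, loop index a+1) agrees with B's loop
theorem asc_eq (x : Int) (hx : 4 ≤ x) :
    ∀ (n : Nat) (a : Int), (x - a).toNat ≤ n → 2 ≤ a → a ≤ x - 1 →
      A_tail x (a + 1) (PySem.Int.floordiv x a) = iterate_idiv_alt_loop x a := by
  intro n
  induction n with
  | zero => intro a hn h2 hax; omega
  | succ n ih =>
    intro a hn h2 hax
    have hq1 : 1 ≤ PySem.Int.floordiv x a := fd_pos x a (by omega) (by omega)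
    by_cases hb : PySem.Int.floordiv x (a + 1) = PySem.Int.floordiv x a
    · rw [A_tail_break x (a + 1) (PySem.Int.floordiv x a) (by omega) hb]
      have hlt := fd_break x a (by omega) (by omega) hb
      have := desc_eq x hx (PySem.Int.floordiv x a).toNat (PySem.Int.floordiv x a) a
        le_rfl hq1 (by omega) (by omega) rfl
      simpa using this
    · rw [A_tail_step x (a + 1) (PySem.Int.floordiv x a) (by omega) hb]
      have hlt : PySem.Int.floordiv x (a + 1) < PySem.Int.floordiv x a :=
        lt_of_le_of_ne (fd_anti x a (a + 1) (by omega) (by omega) (by omega)) hb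
      have hinv := fd_inv x a (by omega) (by omega) hlt
      rw [alt_loop_cons x a (by omega) (by omega), hinv]
      have hne : a ≠ x - 1 := by
        intro h
        apply hb
        have e1 : PySem.Int.floordiv x (a + 1) = 1 := by
          rw [h, sub_add_cancel, fd_self x (by omega)]
        have e2 : PySem.Int.floordiv x a = 1 := by
          rw [h, fd_pred x (by omega)]
        rw [e1, e2]
      have := ih (a + 1) (by omega) (by omega) (by omega)
      simp only [add_sub_cancel_right]
      rw [this]
-- ===== VERDICT (by name: the statement is the Claim_ definition above) =====
theorem iterate_idiv_spec : Claim_equal_iterate_idiv := by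
  intro x _
  unfold Spec_iterate_idiv
  by_cases h0 : x ≤ 0
  · simp [iterate_idiv, iterate_idiv_alt, h0, show x ≤ 3 by omega,
      show ¬ x = 2 by omega, show ¬ x = 3 by omega]
  by_cases h3 : x ≤ 3
  · have hx : x = 1 ∨ x = 2 ∨ x = 3 := by omega
    rcases hx with h | h | h <;> subst h
    · rw [iterate_idiv_alt, if_neg (by omega), alt_loop_cons 1 1 (by omega) (by omega)]
      rw [show PySem.Int.floordiv 1 1 = 1 from by decide]
      rw [show PySem.Int.floordiv 1 1 = 1 from by decide]
      rw [show (1 : Int) + 1 = 2 from by omega, alt_loop_nil 1 2 (by omega)]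
      simp [iterate_idiv]
    · rw [iterate_idiv_alt, if_neg (by omega), alt_loop_cons 2 1 (by omega) (by omega)]
      rw [show PySem.Int.floordiv 2 1 = 2 from by decide,
        show PySem.Int.floordiv 2 2 = 1 from by decide]
      rw [show (1 : Int) + 1 = 2 from by omega, alt_loop_cons 2 2 (by omega) (by omega)]
      rw [show PySem.Int.floordiv 2 2 = 1 from by decide,
        show PySem.Int.floordiv 2 1 = 2 from by decide]
      rw [show (2 : Int) + 1 = 3 from by omega, alt_loop_nil 2 3 (by omega)]
      simp [iterate_idiv]
    · rw [iterate_idiv_alt, if_neg (by omega), alt_loop_cons 3 1 (by omega) (by omega)]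
      rw [show PySem.Int.floordiv 3 1 = 3 from by decide,
        show PySem.Int.floordiv 3 3 = 1 from by decide]
      rw [show (1 : Int) + 1 = 2 from by omega, alt_loop_cons 3 2 (by omega) (by omega)]
      rw [show PySem.Int.floordiv 3 2 = 1 from by decide,
        show PySem.Int.floordiv 3 1 = 3 from by decide]
      rw [show (3 : Int) + 1 = 4 from by omega, alt_loop_nil 3 4 (by omega)]
      simp [iterate_idiv]
  · have hx : 4 ≤ x := by omega
    have e : iterate_idiv x = (x, 1, 2) :: A_tail x 3 (PySem.Int.floordiv x 2) := by
      simp only [iterate_idiv, if_neg h3, A_tail]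
      rw [List.append_assoc]
    have h2 := asc_eq x hx (x - 2).toNat 2 (by omega) (by omega) (by omega)
    rw [show (2 : Int) + 1 = 3 from by omega] at h2
    rw [e, h2]
    rw [iterate_idiv_alt, if_neg (by omega), alt_loop_cons x 1 (by omega) (by omega)]
    rw [fd_one x, fd_self x (by omega)]
    norm_num
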